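-- pv_equiv track=rewrite | github.com/s13n/sodaCat | extractors/generate_stm32_models.py | _resolve_chip_param
-- ===== SOURCE A (Python) =====
-- def _resolve_chip_param(chip_params, subfamily, chip, instance, block_type, param_name, default=None):
--     """Resolve a parameter value using the subfamily-keyed chip_params structure.
--
--     Resolution order:
--     1. Per-subfamily, per-chip, instance name
--     2. Per-subfamily, per-chip, block name
--     3. Per-subfamily, _all, instance name
--     4. Per-subfamily, _all, block name
--     5. Family _all, _all, instance name
--     6. Family _all, _all, block name
--     7. Param default from block declaration
--     """
--     for sf_key in (subfamily, '_all'):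
--         sf = chip_params.get(sf_key)
--         if not sf:
--             continue
--         chip_keys = [chip, '_all'] if sf_key != '_all' else ['_all']
--         for chip_key in chip_keys:
--             chip_section = sf.get(chip_key)
--             if not chip_section:
--                 continue
--             for target_key in (instance, block_type):
--                 if target_key and target_key in chip_section:
--                     params = chip_section[target_key]
--                     if param_name in params:
--                         return params[param_name]
--     return default
-- ===== SOURCE B (Python) =====
-- def _resolve_chip_param(chip_params, subfamily, chip, instance, block_type, param_name, default=None):
--     """Single scan over the whole nested structure: score every entry that holds
--     param_name with a numeric priority rank and keep the minimum-rank value."""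
--     best_rank = None
--     best_val = None
--     for sf_key, sf in chip_params.items():
--         for chip_key, section in sf.items():
--             for target_key, params in section.items():
--                 if param_name not in params:
--                     continue
--                 if sf_key == subfamily and subfamily != '_all' and chip_key == chip:
--                     scope = 0
--                 elif sf_key == subfamily and subfamily != '_all' and chip_key == '_all':
--                     scope = 1
--                 elif sf_key == '_all' and chip_key == '_all':
--                     scope = 2
--                 else:
--                     continue
--                 if instance and target_key == instance:
--                     kind = 0
--                 elif block_type and target_key == block_type:
--                     kind = 1
--                 else:
--                     continue
--                 rank = 2 * scope + kind
--                 if best_rank is None or rank < best_rank: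
--                     best_rank, best_val = rank, params[param_name]
--     return best_val if best_rank is not None else default
-- ===== Notes on version B (the rewrite author's own statement) =====
-- stated objective: alternative
-- what changed: B replaces A's priority-ordered probes of six candidate key paths by a single exhaustive scan of the nested structure that scores every entry containing param_name with a numeric priority rank (scope*2+kind) and returns the minimum-rank value, relying on the fact that at most one entry exists per rank.
import Mathlib
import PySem

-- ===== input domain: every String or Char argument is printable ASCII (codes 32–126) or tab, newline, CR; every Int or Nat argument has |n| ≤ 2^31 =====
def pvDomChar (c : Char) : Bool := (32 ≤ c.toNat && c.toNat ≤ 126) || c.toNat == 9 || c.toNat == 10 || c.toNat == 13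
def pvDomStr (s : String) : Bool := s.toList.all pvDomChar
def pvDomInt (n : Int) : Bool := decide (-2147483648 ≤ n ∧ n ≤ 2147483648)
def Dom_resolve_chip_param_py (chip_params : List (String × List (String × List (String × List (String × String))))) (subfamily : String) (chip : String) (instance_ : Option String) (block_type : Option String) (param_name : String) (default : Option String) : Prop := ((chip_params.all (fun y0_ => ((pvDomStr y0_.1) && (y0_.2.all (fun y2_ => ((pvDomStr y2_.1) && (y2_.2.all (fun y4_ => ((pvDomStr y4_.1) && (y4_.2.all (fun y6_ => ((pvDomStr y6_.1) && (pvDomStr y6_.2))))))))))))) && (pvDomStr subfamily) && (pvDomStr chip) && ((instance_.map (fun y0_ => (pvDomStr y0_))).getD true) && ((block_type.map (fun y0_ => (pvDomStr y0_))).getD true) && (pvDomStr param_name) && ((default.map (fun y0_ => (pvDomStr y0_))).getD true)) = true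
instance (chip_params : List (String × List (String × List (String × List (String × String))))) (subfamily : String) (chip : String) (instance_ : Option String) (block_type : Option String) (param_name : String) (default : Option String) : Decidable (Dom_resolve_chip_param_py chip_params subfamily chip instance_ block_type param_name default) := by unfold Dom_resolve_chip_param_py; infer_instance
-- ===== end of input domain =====

-- B replaces A's priority-ordered probes of six candidate key paths by one exhaustive scan of the
-- nested structure that scores each matching entry with a numeric rank and keeps the minimum
-- (alternative algorithm, same return value).

-- ===== PORT A =====
-- dict.get(k): first-match lookup on the association list (PySem.Dict semantics)
def pvGet {a : Type} (d : List (String × a)) (k : String) : Option a :=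
  (PySem.Dict.mk d).get? k

-- `for target_key in (instance, block_type)` body: `if target_key and target_key in chip_section: ... if param_name in params: return ...`
def pvTryTargetA (sec : List (String × List (String × String))) (tk : Option String) (pn : String) : Option String :=
  match tk with
  | none => none                      -- falsy target_key: skip
  | some t =>
    if t = "" then none               -- falsy target_key: skip
    else match pvGet sec t with
      | none => none                  -- target_key not in chip_section
      | some params => pvGet params pn  -- return params[param_name] if present, else fall through

-- one iteration of `for chip_key in chip_keys` (early return modelled by Option.or)
def pvTryChipA (sf : List (String × List (String × List (String × String)))) (ck : String) (inst bt : Option String) (pn : String) : Option String :=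
  match pvGet sf ck with
  | none => none
  | some sec =>
    if sec = [] then none             -- `if not chip_section: continue`
    else (pvTryTargetA sec inst pn).or (pvTryTargetA sec bt pn)

def pvLoopChipsA (sf : List (String × List (String × List (String × String)))) (cks : List String) (inst bt : Option String) (pn : String) : Option String :=
  match cks with
  | [] => none
  | c :: r => (pvTryChipA sf c inst bt pn).or (pvLoopChipsA sf r inst bt pn)

-- one iteration of `for sf_key in (subfamily, '_all')`
def pvTrySfA (cp : List (String × List (String × List (String × List (String × String))))) (sk chip : String) (inst bt : Option String) (pn : String) : Option String :=
  match pvGet cp sk with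
  | none => none
  | some sf =>
    if sf = [] then none              -- `if not sf: continue`
    else pvLoopChipsA sf (if sk ≠ "_all" then [chip, "_all"] else ["_all"]) inst bt pn

def resolve_chip_param_py (chip_params : List (String × List (String × List (String × List (String × String))))) (subfamily : String) (chip : String) (instance_ : Option String) (block_type : Option String) (param_name : String) (default : Option String) : Option String :=
  match (pvTrySfA chip_params subfamily chip instance_ block_type param_name).or
        (pvTrySfA chip_params "_all" chip instance_ block_type param_name) with
  | some v => some v
  | none => default

-- ===== PORT B =====
-- dict.items() iteration on an association list: distinct keys, first occurrence wins
-- (exactly the PySem dict reading: lookup = first match)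
def pvItemsAux {a : Type} : List (String × a) → List String → List (String × a)
  | [], _ => []
  | (k, v) :: r, seen => if k ∈ seen then pvItemsAux r seen else (k, v) :: pvItemsAux r (k :: seen)

def pvItems {a : Type} (d : List (String × a)) : List (String × a) :=
  pvItemsAux d []

-- `instance and target_key == instance` (falsy = None or '')
def pvTruthyIs (o : Option String) (tk : String) : Bool :=
  match o with
  | none => false
  | some x => !(x == "") && (tk == x)

-- the scope elif chain of Source B
def pvScopeB (subfamily chip sk ck : String) : Option Nat :=
  if sk == subfamily && !(subfamily == "_all") && ck == chip then some 0
  else if sk == subfamily && !(subfamily == "_all") && ck == "_all" then some 1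
  else if sk == "_all" && ck == "_all" then some 2
  else none

-- the kind elif chain of Source B
def pvKindB (inst bt : Option String) (tk : String) : Option Nat :=
  if pvTruthyIs inst tk then some 0
  else if pvTruthyIs bt tk then some 1
  else none

-- rank = 2 * scope + kind (none = one of the `continue`s fired)
def pvRankB (subfamily chip : String) (inst bt : Option String) (sk ck tk : String) : Option Nat :=
  match pvScopeB subfamily chip sk ck, pvKindB inst bt tk with
  | some s, some t => some (2 * s + t)
  | _, _ => none

-- keep the smaller rank (strictly: ties cannot occur, earlier entry wins)
def pvMerge (st : Option (Nat × String)) (o : Option (Nat × String)) : Option (Nat × String) :=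
  match o with
  | none => st
  | some (r, v) =>
    match st with
    | none => some (r, v)
    | some (br, bv) => if r < br then some (r, v) else some (br, bv)

-- innermost loop body of Source B
def pvVisit (subfamily chip : String) (inst bt : Option String) (pn : String)
    (st : Option (Nat × String)) (sk ck tk : String) (params : List (String × String)) : Option (Nat × String) :=
  match pvGet params pn with
  | none => st                        -- `if param_name not in params: continue`
  | some v =>
    match pvRankB subfamily chip inst bt sk ck tk with
    | none => st                      -- scope/kind `continue`
    | some r => pvMerge st (some (r, v))

def resolve_chip_param_py_alt (chip_params : List (String × List (String × List (String × List (String × String))))) (subfamily : String) (chip : String) (instance_ : Option String) (block_type : Option String) (param_name : String) (default : Option String) : Option String :=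
  let best := (pvItems chip_params).foldl
    (fun st p => (pvItems p.2).foldl
      (fun st q => (pvItems q.2).foldl
        (fun st t => pvVisit subfamily chip instance_ block_type param_name st p.1 q.1 t.1 t.2) st) st)
    (none : Option (Nat × String))
  match best with
  | some (_, v) => some v
  | none => default

-- ===== PRECONDITION & SPEC =====
def Spec_resolve_chip_param_py (chip_params : List (String × List (String × List (String × List (String × String))))) (subfamily : String) (chip : String) (instance_ : Option String) (block_type : Option String) (param_name : String) (default : Option String) (out : Option String) : Prop := out = resolve_chip_param_py_alt chip_params subfamily chip instance_ block_type param_name default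
instance (chip_params : List (String × List (String × List (String × List (String × String))))) (subfamily : String) (chip : String) (instance_ : Option String) (block_type : Option String) (param_name : String) (default : Option String) (out : Option String) : Decidable (Spec_resolve_chip_param_py chip_params subfamily chip instance_ block_type param_name default out) := by unfold Spec_resolve_chip_param_py; infer_instance

-- ===== CLAIM (what is proved, stated in full; the proofs are below) =====
def Claim_equal_resolve_chip_param_py : Prop := ∀ (chip_params : List (String × List (String × List (String × List (String × String))))) (subfamily : String) (chip : String) (instance_ : Option String) (block_type : Option String) (param_name : String) (default : Option String), Dom_resolve_chip_param_py chip_params subfamily chip instance_ block_type param_name default → Spec_resolve_chip_param_py chip_params subfamily chip instance_ block_type param_name default (resolve_chip_param_py chip_params subfamily chip instance_ block_type param_name default)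

-- ===== LEMMAS AND PROOFS =====

-- basic facts about the shared first-match lookup
theorem pvGet_cons {a : Type} (k k' : String) (v : a) (r : List (String × a)) :
    pvGet ((k, v) :: r) k' = if k == k' then some v else pvGet r k' := by
  simp [pvGet, PySem.Dict.get?_mk_cons]

theorem mem_pvItemsAux {a : Type} (d : List (String × a)) (seen : List String) (k : String) (v : a) :
    (k, v) ∈ pvItemsAux d seen ↔ (k ∉ seen ∧ pvGet d k = some v) := by
  induction d generalizing seen with
  | nil => simp [pvItemsAux, pvGet, PySem.Dict.get?]
  | cons x r ih =>
    obtain ⟨xk, xv⟩ := x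
    by_cases hs : xk ∈ seen
    · by_cases he : xk = k
      · subst he
        simp [pvItemsAux, hs, ih, pvGet_cons]
      · simp [pvItemsAux, hs, ih, pvGet_cons, (by simpa using he : (xk == k) = false)]
    · by_cases he : xk = k
      · subst he
        simp [pvItemsAux, hs, ih, pvGet_cons]
        exact eq_comm
      · simp [pvItemsAux, hs, ih, pvGet_cons, (by simpa using he : (xk == k) = false), Ne.symm he]

-- membership in pvItems is exactly first-match lookup
theorem mem_pvItems {a : Type} (d : List (String × a)) (k : String) (v : a) :
    (k, v) ∈ pvItems d ↔ pvGet d k = some v := by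
  simp [pvItems, mem_pvItemsAux]

-- the flattened entry list B scans
def pvTriples (cp : List (String × List (String × List (String × List (String × String))))) :
    List (String × String × String × List (String × String)) :=
  (pvItems cp).flatMap (fun p => (pvItems p.2).flatMap (fun q =>
    (pvItems q.2).map (fun t => (p.1, q.1, t.1, t.2))))

-- contribution of a single entry (rank, value) — none if any `continue` fires
def pvEntryMatch (subfamily chip : String) (inst bt : Option String) (pn : String)
    (e : String × String × String × List (String × String)) : Option (Nat × String) :=
  match pvGet e.2.2.2 pn with
  | none => none
  | some v => (pvRankB subfamily chip inst bt e.1 e.2.1 e.2.2.1).map (fun r => (r, v))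

-- truthiness guard of A's target keys
def pvTgt (o : Option String) : Option String :=
  match o with
  | none => none
  | some s => if s == "" then none else some s

-- A's r-th candidate key triple in priority order (none = candidate absent)
def pvCandKeys (subfamily chip : String) (inst bt : Option String) : Nat → Option (String × String × String)
  | 0 => if subfamily == "_all" then none else (pvTgt inst).map (fun t => (subfamily, chip, t))
  | 1 => if subfamily == "_all" then none else (pvTgt bt).map (fun t => (subfamily, chip, t))
  | 2 => if subfamily == "_all" then none else (pvTgt inst).map (fun t => (subfamily, "_all", t))
  | 3 => if subfamily == "_all" then none else (pvTgt bt).map (fun t => (subfamily, "_all", t))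
  | 4 => (pvTgt inst).map (fun t => ("_all", "_all", t))
  | 5 => (pvTgt bt).map (fun t => ("_all", "_all", t))
  | _ => none

-- the raw four-level lookup chain
def pvChain (cp : List (String × List (String × List (String × List (String × String)))))
    (sk ck tk pn : String) : Option String :=
  (pvGet cp sk).bind (fun sf => (pvGet sf ck).bind (fun sec =>
    (pvGet sec tk).bind (fun params => pvGet params pn)))

-- A's r-th candidate value
def pvA (cp : List (String × List (String × List (String × List (String × String)))))
    (subfamily chip : String) (inst bt : Option String) (pn : String) (r : Nat) : Option String :=
  match pvCandKeys subfamily chip inst bt r with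
  | none => none
  | some (sk, ck, tk) => pvChain cp sk ck tk pn

-- one candidate probe of A, as a proof helper (target guard + chain with emptiness skips)
def pvCandA (cp : List (String × List (String × List (String × List (String × String)))))
    (s c : String) (tk : Option String) (pn : String) : Option String :=
  match tk with
  | none => none
  | some t =>
    if t = "" then none
    else match pvGet cp s with
      | none => none
      | some sf =>
        if sf = [] then none
        else match pvGet sf c with
          | none => none
          | some sec =>
            if sec = [] then none
            else match pvGet sec t with
              | none => none
              | some params => pvGet params pn

-- the emptiness skips of A are redundant: the chain form
theorem candA_eq_chain (cp : List (String × List (String × List (String × List (String × String)))))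
    (s c : String) (o : Option String) (pn : String) :
    pvCandA cp s c o pn = match pvTgt o with
      | none => none
      | some t => pvChain cp s c t pn := by
  cases o with
  | none => rfl
  | some t =>
    by_cases ht : t = ""
    · simp [pvCandA, pvTgt, ht]
    · cases hsf : pvGet cp s with
      | none => simp [pvCandA, pvTgt, ht, pvChain, hsf]
      | some sf =>
        by_cases he : sf = []
        · subst he
          simp [pvCandA, pvTgt, ht, pvChain, hsf,
            show pvGet ([] : List (String × List (String × List (String × String)))) c = none from rfl]
        · cases hc : pvGet sf c with
          | none => simp [pvCandA, pvTgt, ht, pvChain, hsf, he, hc]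
          | some sec =>
            by_cases hse : sec = []
            · subst hse
              simp [pvCandA, pvTgt, ht, pvChain, hsf, he, hc,
                show pvGet ([] : List (String × List (String × String))) t = none from rfl]
            · cases hp : pvGet sec t <;>
                simp [pvCandA, pvTgt, ht, pvChain, hsf, he, hc, hse, hp]

-- the two targets of one (sf_key, chip_key) path, as A computes them
theorem candA_pair (cp : List (String × List (String × List (String × List (String × String)))))
    (s c : String) (inst bt : Option String) (pn : String) :
    (pvCandA cp s c inst pn).or (pvCandA cp s c bt pn)
      = match pvGet cp s with
        | none => none
        | some sf => if sf = [] then none else pvTryChipA sf c inst bt pn := by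
  cases hsf : pvGet cp s with
  | none => cases inst <;> cases bt <;> simp [pvCandA, hsf]
  | some sf =>
    by_cases he : sf = []
    · cases inst <;> cases bt <;> simp [pvCandA, hsf, he]
    · cases hc : pvGet sf c with
      | none =>
        cases inst <;> cases bt <;>
          simp [pvCandA, pvTryChipA, hsf, he, hc]
      | some sec =>
        by_cases hse : sec = [] <;>
          cases inst <;> cases bt <;>
          simp [pvCandA, pvTryChipA, pvTryTargetA, hsf, he, hc, hse]

-- A's '_all' sf_key iteration
theorem trySfA_all (cp : List (String × List (String × List (String × List (String × String)))))
    (chip : String) (inst bt : Option String) (pn : String) :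
    pvTrySfA cp "_all" chip inst bt pn
      = (pvCandA cp "_all" "_all" inst pn).or (pvCandA cp "_all" "_all" bt pn) := by
  rw [candA_pair]
  cases hsf : pvGet cp "_all" with
  | none => simp [pvTrySfA, hsf]
  | some sf =>
    by_cases he : sf = [] <;> simp [pvTrySfA, hsf, he, pvLoopChipsA]

-- A's per-subfamily sf_key iteration (sk ≠ '_all')
theorem trySfA_ne (cp : List (String × List (String × List (String × List (String × String)))))
    (sk chip : String) (inst bt : Option String) (pn : String) (hk : sk ≠ "_all") :
    pvTrySfA cp sk chip inst bt pn
      = ((pvCandA cp sk chip inst pn).or (pvCandA cp sk chip bt pn)).or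
        ((pvCandA cp sk "_all" inst pn).or (pvCandA cp sk "_all" bt pn)) := by
  rw [candA_pair, candA_pair]
  cases hsf : pvGet cp sk with
  | none => simp [pvTrySfA, hsf]
  | some sf =>
    by_cases he : sf = [] <;> simp [pvTrySfA, hsf, he, hk, pvLoopChipsA]

-- pvA in terms of pvCandA, one lemma per index
theorem pvA_eq_candA (cp : List (String × List (String × List (String × List (String × String)))))
    (sk' ck' : String) (o : Option String) (pn : String) :
    (match (pvTgt o).map (fun t => (sk', ck', t)) with
      | none => none
      | some (sk, ck, tk) => pvChain cp sk ck tk pn) = pvCandA cp sk' ck' o pn := by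
  rw [candA_eq_chain]
  cases pvTgt o <;> simp

-- A equals the or-chain of its six candidates
theorem portA_eq_orchain (cp : List (String × List (String × List (String × List (String × String)))))
    (subfamily chip : String) (inst bt : Option String) (pn : String) (default : Option String) :
    resolve_chip_param_py cp subfamily chip inst bt pn default =
      match (pvA cp subfamily chip inst bt pn 0).or ((pvA cp subfamily chip inst bt pn 1).or
            ((pvA cp subfamily chip inst bt pn 2).or ((pvA cp subfamily chip inst bt pn 3).or
            ((pvA cp subfamily chip inst bt pn 4).or (pvA cp subfamily chip inst bt pn 5))))) with
      | some v => some v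
      | none => default := by
  by_cases hsf : subfamily = "_all"
  · subst hsf
    have h0 : pvA cp "_all" chip inst bt pn 0 = none := by simp [pvA, pvCandKeys]
    have h1 : pvA cp "_all" chip inst bt pn 1 = none := by simp [pvA, pvCandKeys]
    have h2 : pvA cp "_all" chip inst bt pn 2 = none := by simp [pvA, pvCandKeys]
    have h3 : pvA cp "_all" chip inst bt pn 3 = none := by simp [pvA, pvCandKeys]
    have h4 : pvA cp "_all" chip inst bt pn 4 = pvCandA cp "_all" "_all" inst pn := by
      simp only [pvA, pvCandKeys]; exact pvA_eq_candA cp "_all" "_all" inst pn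
    have h5 : pvA cp "_all" chip inst bt pn 5 = pvCandA cp "_all" "_all" bt pn := by
      simp only [pvA, pvCandKeys]; exact pvA_eq_candA cp "_all" "_all" bt pn
    rw [resolve_chip_param_py, trySfA_all, h0, h1, h2, h3, h4, h5]
    cases pvCandA cp "_all" "_all" inst pn <;> cases pvCandA cp "_all" "_all" bt pn <;> simp
  · have h0 : pvA cp subfamily chip inst bt pn 0 = pvCandA cp subfamily chip inst pn := by
      simp only [pvA, pvCandKeys]
      rw [if_neg (by simpa using hsf)]
      exact pvA_eq_candA cp subfamily chip inst pn
    have h1 : pvA cp subfamily chip inst bt pn 1 = pvCandA cp subfamily chip bt pn := by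
      simp only [pvA, pvCandKeys]
      rw [if_neg (by simpa using hsf)]
      exact pvA_eq_candA cp subfamily chip bt pn
    have h2 : pvA cp subfamily chip inst bt pn 2 = pvCandA cp subfamily "_all" inst pn := by
      simp only [pvA, pvCandKeys]
      rw [if_neg (by simpa using hsf)]
      exact pvA_eq_candA cp subfamily "_all" inst pn
    have h3 : pvA cp subfamily chip inst bt pn 3 = pvCandA cp subfamily "_all" bt pn := by
      simp only [pvA, pvCandKeys]
      rw [if_neg (by simpa using hsf)]
      exact pvA_eq_candA cp subfamily "_all" bt pn
    have h4 : pvA cp subfamily chip inst bt pn 4 = pvCandA cp "_all" "_all" inst pn := by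
      simp only [pvA, pvCandKeys]; exact pvA_eq_candA cp "_all" "_all" inst pn
    have h5 : pvA cp subfamily chip inst bt pn 5 = pvCandA cp "_all" "_all" bt pn := by
      simp only [pvA, pvCandKeys]; exact pvA_eq_candA cp "_all" "_all" bt pn
    rw [resolve_chip_param_py, trySfA_ne cp subfamily chip inst bt pn hsf, trySfA_all,
        h0, h1, h2, h3, h4, h5]
    cases pvCandA cp subfamily chip inst pn <;> cases pvCandA cp subfamily chip bt pn <;>
      cases pvCandA cp subfamily "_all" inst pn <;> cases pvCandA cp subfamily "_all" bt pn <;>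
      cases pvCandA cp "_all" "_all" inst pn <;> cases pvCandA cp "_all" "_all" bt pn <;> rfl

-- pvVisit is a merge with the entry's match
theorem visit_eq_merge (subfamily chip : String) (inst bt : Option String) (pn : String)
    (st : Option (Nat × String)) (sk ck tk : String) (params : List (String × String)) :
    pvVisit subfamily chip inst bt pn st sk ck tk params
      = pvMerge st (pvEntryMatch subfamily chip inst bt pn (sk, ck, tk, params)) := by
  cases hg : pvGet params pn with
  | none => simp [pvVisit, pvEntryMatch, hg, pvMerge]
  | some v =>
    cases hr : pvRankB subfamily chip inst bt sk ck tk <;>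
      simp [pvVisit, pvEntryMatch, hg, hr, pvMerge]

-- folding over a flatMap is the nested fold
theorem foldl_flatMap {α β σ : Type} (l : List α) (f : α → List β) (g : σ → β → σ) (i : σ) :
    (l.flatMap f).foldl g i = l.foldl (fun s x => (f x).foldl g s) i := by
  induction l generalizing i with
  | nil => rfl
  | cons x xs ih => simp [List.flatMap_cons, List.foldl_append, ih]

-- B's nested folds = a flat merge-fold over the entry matches
theorem portB_eq_fold (cp : List (String × List (String × List (String × List (String × String)))))
    (subfamily chip : String) (inst bt : Option String) (pn : String) (default : Option String) :
    resolve_chip_param_py_alt cp subfamily chip inst bt pn default =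
      match ((pvTriples cp).map (pvEntryMatch subfamily chip inst bt pn)).foldl pvMerge none with
      | some (_, v) => some v
      | none => default := by
  simp only [resolve_chip_param_py_alt, pvTriples, List.foldl_map, foldl_flatMap, visit_eq_merge]

-- basic pvMerge facts
theorem pvMerge_none_iff (st o : Option (Nat × String)) :
    pvMerge st o = none ↔ st = none ∧ o = none := by
  cases o with
  | none => simp [pvMerge]
  | some p =>
    obtain ⟨r, v⟩ := p
    cases st with
    | none => simp [pvMerge]
    | some q => obtain ⟨br, bv⟩ := q; simp [pvMerge]; split <;> simp

theorem pvMerge_eq_some (st o : Option (Nat × String)) (r : Nat) (v : String)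
    (h : pvMerge st o = some (r, v)) : st = some (r, v) ∨ o = some (r, v) := by
  cases o with
  | none => exact Or.inl h
  | some p =>
    obtain ⟨r0, v0⟩ := p
    cases st with
    | none => exact Or.inr h
    | some q =>
      obtain ⟨br, bv⟩ := q
      simp only [pvMerge] at h
      split at h
      · exact Or.inr h
      · exact Or.inl h

theorem pvMerge_le_left (st o : Option (Nat × String)) (r' : Nat) (v' : String)
    (h : st = some (r', v')) : ∃ r'' v'', pvMerge st o = some (r'', v'') ∧ r'' ≤ r' := by
  subst h
  cases o with
  | none => exact ⟨r', v', rfl, le_refl _⟩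
  | some p =>
    obtain ⟨r0, v0⟩ := p
    by_cases hlt : r0 < r'
    · exact ⟨r0, v0, by simp [pvMerge, hlt], by omega⟩
    · exact ⟨r', v', by simp [pvMerge, hlt], le_refl _⟩

theorem pvMerge_le_right (st o : Option (Nat × String)) (r' : Nat) (v' : String)
    (h : o = some (r', v')) : ∃ r'' v'', pvMerge st o = some (r'', v'') ∧ r'' ≤ r' := by
  subst h
  cases st with
  | none => exact ⟨r', v', rfl, le_refl _⟩
  | some q =>
    obtain ⟨br, bv⟩ := q
    by_cases hlt : r' < br
    · exact ⟨r', v', by simp [pvMerge, hlt], le_refl _⟩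
    · exact ⟨br, bv, by simp [pvMerge, hlt], by omega⟩

-- the fold with pvMerge selects an element of minimal rank
theorem foldMerge_spec (l : List (Option (Nat × String))) (st : Option (Nat × String)) :
    (l.foldl pvMerge st = none → st = none ∧ ∀ o ∈ l, o = none) ∧
    (∀ r v, l.foldl pvMerge st = some (r, v) →
      (st = some (r, v) ∨ some (r, v) ∈ l) ∧
      (∀ r' v', (st = some (r', v') ∨ some (r', v') ∈ l) → r ≤ r')) := by
  induction l generalizing st with
  | nil =>
    refine ⟨fun h => ⟨h, by simp⟩, fun r v h => ⟨Or.inl h, ?_⟩⟩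
    rintro r' v' (h' | h')
    · simp only [List.foldl_nil] at h
      rw [h'] at h
      simp at h
      omega
    · simp at h'
  | cons o l ih =>
    obtain ⟨ih1, ih2⟩ := ih (pvMerge st o)
    constructor
    · intro h
      obtain ⟨h1, h2⟩ := ih1 h
      obtain ⟨hst, ho⟩ := (pvMerge_none_iff st o).mp h1
      refine ⟨hst, ?_⟩
      intro x hx
      rcases List.mem_cons.mp hx with h3 | h3
      · rw [h3]; exact ho
      · exact h2 x h3
    · intro r v h
      obtain ⟨hmem, hmin⟩ := ih2 r v h
      constructor
      · rcases hmem with hm | hm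
        · rcases pvMerge_eq_some st o r v hm with h' | h'
          · exact Or.inl h'
          · exact Or.inr (by simp [h'])
        · exact Or.inr (List.mem_cons_of_mem _ hm)
      · rintro r' v' (h' | h')
        · obtain ⟨r'', v'', hm, hle⟩ := pvMerge_le_left st o r' v' h'
          exact le_trans (hmin r'' v'' (Or.inl hm)) hle
        · rcases List.mem_cons.mp h' with h'' | h''
          · obtain ⟨r'', v'', hm, hle⟩ := pvMerge_le_right st o r' v' h''.symm
            exact le_trans (hmin r'' v'' (Or.inl hm)) hle
          · exact hmin r' v' (Or.inr h'')

-- ranks are bounded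
theorem scope_le_two (subfamily chip sk ck : String) (s : Nat)
    (h : pvScopeB subfamily chip sk ck = some s) : s ≤ 2 := by
  unfold pvScopeB at h
  split_ifs at h <;> simp_all <;> omega

theorem kind_le_one (inst bt : Option String) (tk : String) (t : Nat)
    (h : pvKindB inst bt tk = some t) : t ≤ 1 := by
  unfold pvKindB at h
  split_ifs at h <;> simp_all <;> omega

theorem rank_le_five (subfamily chip : String) (inst bt : Option String) (sk ck tk : String) (r : Nat)
    (h : pvRankB subfamily chip inst bt sk ck tk = some r) : r ≤ 5 := by
  rcases hS : pvScopeB subfamily chip sk ck with _ | s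
  · simp [pvRankB, hS] at h
  rcases hK : pvKindB inst bt tk with _ | t
  · simp [pvRankB, hS, hK] at h
  simp only [pvRankB, hS, hK, Option.some.injEq] at h
  have := scope_le_two subfamily chip sk ck s hS
  have := kind_le_one inst bt tk t hK
  omega

-- a successful entry match records its rank
theorem entry_rank (subfamily chip : String) (inst bt : Option String) (pn : String)
    (e : String × String × String × List (String × String)) (r : Nat) (v : String)
    (h : pvEntryMatch subfamily chip inst bt pn e = some (r, v)) :
    pvRankB subfamily chip inst bt e.1 e.2.1 e.2.2.1 = some r := by
  unfold pvEntryMatch at h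
  rcases hg : pvGet e.2.2.2 pn with _ | v0 <;> rw [hg] at h
  · cases h
  · rcases hr : pvRankB subfamily chip inst bt e.1 e.2.1 e.2.2.1 with _ | r0 <;> rw [hr] at h
    · cases h
    · simp at h
      rw [h.1]

-- soundness: every scanned entry that scores rank r carries exactly candidate r's value
theorem entry_sound (cp : List (String × List (String × List (String × List (String × String)))))
    (subfamily chip : String) (inst bt : Option String) (pn : String)
    (e : String × String × String × List (String × String)) (r : Nat) (v : String)
    (he : e ∈ pvTriples cp) (hm : pvEntryMatch subfamily chip inst bt pn e = some (r, v)) :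
    pvA cp subfamily chip inst bt pn r = some v := by
  obtain ⟨sk, ck, tk, params⟩ := e
  simp only [pvTriples, List.mem_flatMap, List.mem_map] at he
  obtain ⟨p, hp, q, hq, t, ht, heq⟩ := he
  obtain ⟨pk, sf⟩ := p
  obtain ⟨qk, sec⟩ := q
  obtain ⟨tk0, params0⟩ := t
  cases heq
  have hGp : pvGet cp pk = some sf := (mem_pvItems cp pk sf).mp hp
  have hGq : pvGet sf qk = some sec := (mem_pvItems sf qk sec).mp hq
  have hGt : pvGet sec tk0 = some params0 := (mem_pvItems sec tk0 params0).mp ht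
  unfold pvEntryMatch at hm
  rcases hg : pvGet params0 pn with _ | v0 <;> rw [hg] at hm
  · cases hm
  rcases hr : pvRankB subfamily chip inst bt pk qk tk0 with _ | r0 <;> rw [hr] at hm
  · cases hm
  simp only [Option.map_some, Option.some.injEq, Prod.mk.injEq] at hm
  obtain ⟨rfl, rfl⟩ := hm
  unfold pvRankB at hr
  rcases hS : pvScopeB subfamily chip pk qk with _ | s0 <;> rw [hS] at hr
  · cases hr
  rcases hK : pvKindB inst bt tk0 with _ | t0 <;> rw [hK] at hr
  · cases hr
  simp only [Option.some.injEq] at hr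
  subst hr
  -- decode the kind
  have hkind : (t0 = 0 ∧ pvTgt inst = some tk0) ∨ (t0 = 1 ∧ pvTgt bt = some tk0) := by
    unfold pvKindB at hK
    split_ifs at hK with k1 k2
    · left
      refine ⟨by simpa using hK.symm, ?_⟩
      cases inst with
      | none => simp [pvTruthyIs] at k1
      | some x =>
        simp [pvTruthyIs] at k1
        simp [pvTgt, k1.1, k1.2]
    · right
      refine ⟨by simpa using hK.symm, ?_⟩
      cases bt with
      | none => simp [pvTruthyIs] at k2
      | some x =>
        simp [pvTruthyIs] at k2
        simp [pvTgt, k2.1, k2.2]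
  -- decode the scope and conclude per case
  unfold pvScopeB at hS
  split_ifs at hS with c1 c2 c3
  · simp only [Bool.and_eq_true, beq_iff_eq, Bool.not_eq_eq_eq_not, Bool.not_true,
      beq_eq_false_iff_ne, ne_eq] at c1
    obtain ⟨⟨rfl, hne⟩, rfl⟩ := c1
    have hs0 : s0 = 0 := by simpa using hS.symm
    subst hs0
    rcases hkind with ⟨rfl, hT⟩ | ⟨rfl, hT⟩ <;>
      simp [pvA, pvCandKeys, hne, hT, pvChain, hGp, hGq, hGt, hg]
  · simp only [Bool.and_eq_true, beq_iff_eq, Bool.not_eq_eq_eq_not, Bool.not_true,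
      beq_eq_false_iff_ne, ne_eq] at c2
    obtain ⟨⟨rfl, hne⟩, rfl⟩ := c2
    have hs0 : s0 = 1 := by simpa using hS.symm
    subst hs0
    rcases hkind with ⟨rfl, hT⟩ | ⟨rfl, hT⟩ <;>
      simp [pvA, pvCandKeys, hne, hT, pvChain, hGp, hGq, hGt, hg]
  · simp only [Bool.and_eq_true, beq_iff_eq] at c3
    obtain ⟨rfl, rfl⟩ := c3
    have hs0 : s0 = 2 := by simpa using hS.symm
    subst hs0
    rcases hkind with ⟨rfl, hT⟩ | ⟨rfl, hT⟩ <;>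
      simp [pvA, pvCandKeys, hT, pvChain, hGp, hGq, hGt, hg]

-- completeness: a non-none candidate r is witnessed by a scanned entry of rank ≤ r and the same value
theorem cand_complete (cp : List (String × List (String × List (String × List (String × String)))))
    (subfamily chip : String) (inst bt : Option String) (pn : String) (r : Nat) (v : String)
    (h : pvA cp subfamily chip inst bt pn r = some v) :
    ∃ e ∈ pvTriples cp, ∃ r' ≤ r, pvEntryMatch subfamily chip inst bt pn e = some (r', v) := by
  have tgt_truthy : ∀ (o : Option String) (tk : String), pvTgt o = some tk → pvTruthyIs o tk = true := by
    intro o tk ho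
    cases o with
    | none => cases ho
    | some x =>
      simp only [pvTgt] at ho
      split_ifs at ho with hx
      · injection ho with ho
        subst ho
        have hx' : (x == "") = false := by simpa using hx
        simp [pvTruthyIs, hx']
  have key : ∀ sk ck tk, pvChain cp sk ck tk pn = some v →
      ∀ r', pvRankB subfamily chip inst bt sk ck tk = some r' →
      ∃ e ∈ pvTriples cp, pvEntryMatch subfamily chip inst bt pn e = some (r', v) := by
    intro sk ck tk hc r' hr
    unfold pvChain at hc
    rcases hGp : pvGet cp sk with _ | sf <;> rw [hGp] at hc
    · simp at hc
    simp only [Option.bind_some] at hc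
    rcases hGq : pvGet sf ck with _ | sec <;> rw [hGq] at hc
    · simp at hc
    simp only [Option.bind_some] at hc
    rcases hGt : pvGet sec tk with _ | params <;> rw [hGt] at hc
    · simp at hc
    simp only [Option.bind_some] at hc
    refine ⟨(sk, ck, tk, params), ?_, ?_⟩
    · simp only [pvTriples, List.mem_flatMap, List.mem_map]
      exact ⟨(sk, sf), (mem_pvItems cp sk sf).mpr hGp, (ck, sec), (mem_pvItems sf ck sec).mpr hGq,
        (tk, params), (mem_pvItems sec tk params).mpr hGt, rfl⟩
    · simp [pvEntryMatch, hc, hr]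
  rcases r with _ | _ | _ | _ | _ | _ | r6
  · -- r = 0 : (subfamily, chip, instance)
    simp only [pvA, pvCandKeys] at h
    by_cases hsf : subfamily = "_all"
    · rw [if_pos (by simpa using hsf)] at h; cases h
    rw [if_neg (by simpa using hsf)] at h
    rcases hti : pvTgt inst with _ | tk <;> rw [hti] at h
    · cases h
    simp only [Option.map_some] at h
    obtain ⟨e, he, hme⟩ := key subfamily chip tk h 0
      (by simp [pvRankB, pvScopeB, pvKindB, hsf, tgt_truthy inst tk hti])
    exact ⟨e, he, 0, le_refl _, hme⟩
  · -- r = 1 : (subfamily, chip, block_type)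
    simp only [pvA, pvCandKeys] at h
    by_cases hsf : subfamily = "_all"
    · rw [if_pos (by simpa using hsf)] at h; cases h
    rw [if_neg (by simpa using hsf)] at h
    rcases hti : pvTgt bt with _ | tk <;> rw [hti] at h
    · cases h
    simp only [Option.map_some] at h
    by_cases hI : pvTruthyIs inst tk = true
    · obtain ⟨e, he, hme⟩ := key subfamily chip tk h 0
        (by simp [pvRankB, pvScopeB, pvKindB, hsf, hI])
      exact ⟨e, he, 0, by omega, hme⟩
    · obtain ⟨e, he, hme⟩ := key subfamily chip tk h 1
        (by simp [pvRankB, pvScopeB, pvKindB, hsf, hI, tgt_truthy bt tk hti])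
      exact ⟨e, he, 1, le_refl _, hme⟩
  · -- r = 2 : (subfamily, '_all', instance)
    simp only [pvA, pvCandKeys] at h
    by_cases hsf : subfamily = "_all"
    · rw [if_pos (by simpa using hsf)] at h; cases h
    rw [if_neg (by simpa using hsf)] at h
    rcases hti : pvTgt inst with _ | tk <;> rw [hti] at h
    · cases h
    simp only [Option.map_some] at h
    by_cases hch : chip = "_all"
    · obtain ⟨e, he, hme⟩ := key subfamily "_all" tk h 0
        (by simp [pvRankB, pvScopeB, pvKindB, hsf, hch, tgt_truthy inst tk hti])
      exact ⟨e, he, 0, by omega, hme⟩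
    · obtain ⟨e, he, hme⟩ := key subfamily "_all" tk h 2
        (by simp [pvRankB, pvScopeB, pvKindB, hsf, (by simpa using Ne.symm hch : ("_all" == chip) = false),
          tgt_truthy inst tk hti])
      exact ⟨e, he, 2, le_refl _, hme⟩
  · -- r = 3 : (subfamily, '_all', block_type)
    simp only [pvA, pvCandKeys] at h
    by_cases hsf : subfamily = "_all"
    · rw [if_pos (by simpa using hsf)] at h; cases h
    rw [if_neg (by simpa using hsf)] at h
    rcases hti : pvTgt bt with _ | tk <;> rw [hti] at h
    · cases h
    simp only [Option.map_some] at h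
    by_cases hch : chip = "_all" <;> by_cases hI : pvTruthyIs inst tk = true
    · obtain ⟨e, he, hme⟩ := key subfamily "_all" tk h 0
        (by simp [pvRankB, pvScopeB, pvKindB, hsf, hch, hI])
      exact ⟨e, he, 0, by omega, hme⟩
    · obtain ⟨e, he, hme⟩ := key subfamily "_all" tk h 1
        (by simp [pvRankB, pvScopeB, pvKindB, hsf, hch, hI, tgt_truthy bt tk hti])
      exact ⟨e, he, 1, by omega, hme⟩
    · obtain ⟨e, he, hme⟩ := key subfamily "_all" tk h 2
        (by simp [pvRankB, pvScopeB, pvKindB, hsf, (by simpa using Ne.symm hch : ("_all" == chip) = false), hI])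
      exact ⟨e, he, 2, by omega, hme⟩
    · obtain ⟨e, he, hme⟩ := key subfamily "_all" tk h 3
        (by simp [pvRankB, pvScopeB, pvKindB, hsf, (by simpa using Ne.symm hch : ("_all" == chip) = false),
          hI, tgt_truthy bt tk hti])
      exact ⟨e, he, 3, le_refl _, hme⟩
  · -- r = 4 : ('_all', '_all', instance)
    simp only [pvA, pvCandKeys] at h
    rcases hti : pvTgt inst with _ | tk <;> rw [hti] at h
    · cases h
    simp only [Option.map_some] at h
    by_cases hsf : subfamily = "_all"
    · obtain ⟨e, he, hme⟩ := key "_all" "_all" tk h 4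
        (by simp [pvRankB, pvScopeB, pvKindB, hsf, tgt_truthy inst tk hti])
      exact ⟨e, he, 4, le_refl _, hme⟩
    · obtain ⟨e, he, hme⟩ := key "_all" "_all" tk h 4
        (by simp [pvRankB, pvScopeB, pvKindB, (by simpa using Ne.symm hsf : ("_all" == subfamily) = false),
          tgt_truthy inst tk hti])
      exact ⟨e, he, 4, le_refl _, hme⟩
  · -- r = 5 : ('_all', '_all', block_type)
    simp only [pvA, pvCandKeys] at h
    rcases hti : pvTgt bt with _ | tk <;> rw [hti] at h
    · cases h
    simp only [Option.map_some] at h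
    by_cases hsf : subfamily = "_all" <;> by_cases hI : pvTruthyIs inst tk = true
    · obtain ⟨e, he, hme⟩ := key "_all" "_all" tk h 4
        (by simp [pvRankB, pvScopeB, pvKindB, hsf, hI])
      exact ⟨e, he, 4, by omega, hme⟩
    · obtain ⟨e, he, hme⟩ := key "_all" "_all" tk h 5
        (by simp [pvRankB, pvScopeB, pvKindB, hsf, hI, tgt_truthy bt tk hti])
      exact ⟨e, he, 5, le_refl _, hme⟩
    · obtain ⟨e, he, hme⟩ := key "_all" "_all" tk h 4
        (by simp [pvRankB, pvScopeB, pvKindB, (by simpa using Ne.symm hsf : ("_all" == subfamily) = false), hI])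
      exact ⟨e, he, 4, by omega, hme⟩
    · obtain ⟨e, he, hme⟩ := key "_all" "_all" tk h 5
        (by simp [pvRankB, pvScopeB, pvKindB, (by simpa using Ne.symm hsf : ("_all" == subfamily) = false),
          hI, tgt_truthy bt tk hti])
      exact ⟨e, he, 5, le_refl _, hme⟩
  · -- r ≥ 6 : no candidate
    simp [pvA, pvCandKeys] at h

-- selecting the first non-none candidate
theorem orchain_first (a : Nat → Option String) (r : Nat) (v : String) (hr : r ≤ 5)
    (hv : a r = some v) (hlt : ∀ r' < r, a r' = none) :
    (a 0).or ((a 1).or ((a 2).or ((a 3).or ((a 4).or (a 5))))) = some v := by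
  interval_cases r
  · simp [hv]
  · simp [hlt 0 (by omega), hv]
  · simp [hlt 0 (by omega), hlt 1 (by omega), hv]
  · simp [hlt 0 (by omega), hlt 1 (by omega), hlt 2 (by omega), hv]
  · simp [hlt 0 (by omega), hlt 1 (by omega), hlt 2 (by omega), hlt 3 (by omega), hv]
  · simp [hlt 0 (by omega), hlt 1 (by omega), hlt 2 (by omega), hlt 3 (by omega), hlt 4 (by omega), hv]

-- ===== VERDICT (by name: the statement is the Claim_ definition above) =====
theorem resolve_chip_param_py_spec : Claim_equal_resolve_chip_param_py := by
  intro cp subfamily chip inst bt pn default _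
  unfold Spec_resolve_chip_param_py
  rw [portA_eq_orchain, portB_eq_fold]
  rcases hres : ((pvTriples cp).map (pvEntryMatch subfamily chip inst bt pn)).foldl pvMerge none
    with _ | ⟨r, v⟩
  · have hall := ((foldMerge_spec _ none).1 hres).2
    have hnone : ∀ i, pvA cp subfamily chip inst bt pn i = none := by
      intro i
      rcases hAi : pvA cp subfamily chip inst bt pn i with _ | u
      · rfl
      · exfalso
        obtain ⟨e, he, r', _, hme⟩ := cand_complete cp subfamily chip inst bt pn i u hAi
        have hmem : pvEntryMatch subfamily chip inst bt pn e
            ∈ (pvTriples cp).map (pvEntryMatch subfamily chip inst bt pn) :=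
          List.mem_map_of_mem he
        have := hall _ hmem
        rw [hme] at this
        cases this
    rw [hnone 0, hnone 1, hnone 2, hnone 3, hnone 4, hnone 5]
    rfl
  · obtain ⟨hmem, hmin⟩ := (foldMerge_spec _ none).2 r v hres
    rcases hmem with h | h
    · cases h
    obtain ⟨e, he, hme⟩ := List.mem_map.mp h
    have hAr : pvA cp subfamily chip inst bt pn r = some v :=
      entry_sound cp subfamily chip inst bt pn e r v he hme
    have hr5 : r ≤ 5 :=
      rank_le_five subfamily chip inst bt e.1 e.2.1 e.2.2.1 r
        (entry_rank subfamily chip inst bt pn e r v hme)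
    have hbelow : ∀ r' < r, pvA cp subfamily chip inst bt pn r' = none := by
      intro r' hlt
      rcases hAi : pvA cp subfamily chip inst bt pn r' with _ | u
      · rfl
      · exfalso
        obtain ⟨e', he', r'', hle, hme'⟩ := cand_complete cp subfamily chip inst bt pn r' u hAi
        have hmem' : some (r'', u) ∈ (pvTriples cp).map (pvEntryMatch subfamily chip inst bt pn) := by
          rw [← hme']
          exact List.mem_map_of_mem he'
        have := hmin r'' u (Or.inr hmem')
        omega
    rw [orchain_first _ r v hr5 hAr hbelow]
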